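-- pv_equiv track=rewrite | github.com/guilhermegor/stpstone | stpstone/utils/parsers/str.py | letters_to_numbers
-- ===== SOURCE A (Python) =====
-- from typing import Literal, Optional, TypedDict, TypeVar, Union
--
-- def letters_to_numbers(
--
--     letters_in_alphabet: int = 21,
--     first_letter_alphabet: str = "f",
--     list_not_in_range: Optional[list] = None,
-- ) -> dict:
--     """Create mapping from letters to numbers.
--
--     Parameters
--     ----------
--     letters_in_alphabet : int
--         Number of letters to include, by default 21
--     first_letter_alphabet : str
--         Starting letter, by default "f"
--     list_not_in_range : Optional[list]
--         Letters to exclude, by default ["i", "l", "o", "p", "r", "s", "t", "w", "y"]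
--
--     Returns
--     -------
--     dict
--         Mapping of letters to numbers
--     """
--     dict_ = dict()
--     i_aux = 0
--
--     if list_not_in_range is None:
--         list_not_in_range = ["i", "l", "o", "p", "r", "s", "t", "w", "y"]
--
--     for i in range(
--         ord(first_letter_alphabet), ord(first_letter_alphabet) + letters_in_alphabet
--     ):
--         if chr(i) not in list_not_in_range:
--             dict_[chr(i)] = i - 101 - i_aux
--         else:
--             i_aux += 1
--
--     return dict_
-- ===== SOURCE B (Python) =====
-- def letters_to_numbers(letters_in_alphabet=21, first_letter_alphabet="f", list_not_in_range=None):
--     excl = list_not_in_range if list_not_in_range is not None else [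
--         "i", "l", "o", "p", "r", "s", "t", "w", "y"]
--     start = ord(first_letter_alphabet)
--     return {
--         chr(i): i - 101 - sum(1 for j in range(start, i) if chr(j) in excl)
--         for i in range(start, start + letters_in_alphabet)
--         if chr(i) not in excl
--     }
-- ===== Notes on version B (the rewrite author's own statement) =====
-- stated objective: alternative
-- what changed: Removes A's stateful loop entirely: each included letter's value is computed independently by a closed formula i - 101 - (count of excluded letters in range(start, i)), so there is no threaded i_aux counter, no else branch and no dict mutated in iteration order; the mapping is one stateless dict comprehension with a per-key prefix count.
import Mathlib
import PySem

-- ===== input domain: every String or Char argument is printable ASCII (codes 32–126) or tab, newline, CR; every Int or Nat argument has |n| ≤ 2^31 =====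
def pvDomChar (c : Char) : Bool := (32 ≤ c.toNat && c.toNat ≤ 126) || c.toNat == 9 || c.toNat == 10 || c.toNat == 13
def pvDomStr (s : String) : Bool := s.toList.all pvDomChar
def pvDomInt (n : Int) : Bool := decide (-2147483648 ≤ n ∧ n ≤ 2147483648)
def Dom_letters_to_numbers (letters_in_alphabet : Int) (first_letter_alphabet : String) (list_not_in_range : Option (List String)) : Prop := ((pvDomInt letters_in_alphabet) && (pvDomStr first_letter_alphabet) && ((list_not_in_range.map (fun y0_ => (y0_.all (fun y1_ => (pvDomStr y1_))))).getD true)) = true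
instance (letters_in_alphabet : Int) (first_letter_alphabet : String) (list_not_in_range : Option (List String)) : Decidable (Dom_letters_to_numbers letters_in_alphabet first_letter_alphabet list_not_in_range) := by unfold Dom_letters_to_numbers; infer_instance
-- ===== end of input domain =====

-- B replaces A's stateful loop (dict mutated in order, threaded i_aux counter, else branch)
-- by a stateless comprehension: each included letter's value is a closed per-key formula,
-- i - 101 - (count of excluded letters below i in the range) (objective: alternative).

-- ord(s) for a one-character string s (exact under Pre_, which demands length 1)
def pvOrd (s : String) : Int := (s.toList.headI.toNat : Int)
-- chr(i); exact for 0 ≤ i < 0xD800 (Pre_ keeps every produced code below the surrogates)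
def pvChr (i : Int) : String := String.ofList [Char.ofNat i.toNat]

-- ===== PORT A =====
def letters_to_numbers (letters_in_alphabet : Int) (first_letter_alphabet : String) (list_not_in_range : Option (List String)) : List (String × Int) :=
  let excl : List String := match list_not_in_range with
    | none => ["i", "l", "o", "p", "r", "s", "t", "w", "y"]
    | some l => l
  let res := (PySem.List.pyRange (pvOrd first_letter_alphabet) (pvOrd first_letter_alphabet + letters_in_alphabet) 1).foldl
    (fun (st : PySem.Dict String Int × Int) i =>
      if pvChr i ∉ excl then (st.1.insert (pvChr i) (i - 101 - st.2), st.2)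
      else (st.1, st.2 + 1))
    (PySem.Dict.empty, 0)
  res.1.items

-- ===== PORT B =====
def letters_to_numbers_alt (letters_in_alphabet : Int) (first_letter_alphabet : String) (list_not_in_range : Option (List String)) : List (String × Int) :=
  let excl : List String := list_not_in_range.getD ["i", "l", "o", "p", "r", "s", "t", "w", "y"]
  let start : Int := pvOrd first_letter_alphabet
  ((PySem.List.pyRange start (start + letters_in_alphabet) 1).filter
      (fun i => decide (pvChr i ∉ excl))).map
    (fun i => (pvChr i,
      i - 101 - (((PySem.List.pyRange start i 1).filter
        (fun j => decide (pvChr j ∈ excl))).length : Int)))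

-- ===== PRECONDITION & SPEC =====
-- Pre_ excludes (besides inputs where A raises: a first letter that is not exactly one
-- character, or a range past chr's 0x10FFFF limit) the inputs whose letter range reaches
-- code 0xD800: there A returns a dict whose high keys are lone UTF-16 surrogates,
-- strings that have no representation as Lean String values.
def Pre_letters_to_numbers (letters_in_alphabet : Int) (first_letter_alphabet : String) (list_not_in_range : Option (List String)) : Prop :=
  first_letter_alphabet.toList.length = 1 ∧
  pvOrd first_letter_alphabet + letters_in_alphabet ≤ 55296
instance (letters_in_alphabet : Int) (first_letter_alphabet : String) (list_not_in_range : Option (List String)) : Decidable (Pre_letters_to_numbers letters_in_alphabet first_letter_alphabet list_not_in_range) := by unfold Pre_letters_to_numbers; infer_instance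

def pvWitness_letters_to_numbers : Int × String × Option (List String) := (21, "f", none)

def Spec_letters_to_numbers (letters_in_alphabet : Int) (first_letter_alphabet : String) (list_not_in_range : Option (List String)) (out : List (String × Int)) : Prop := out = letters_to_numbers_alt letters_in_alphabet first_letter_alphabet list_not_in_range
instance (letters_in_alphabet : Int) (first_letter_alphabet : String) (list_not_in_range : Option (List String)) (out : List (String × Int)) : Decidable (Spec_letters_to_numbers letters_in_alphabet first_letter_alphabet list_not_in_range out) := by unfold Spec_letters_to_numbers; infer_instance

-- ===== CLAIM (what is proved, stated in full; the proofs are below) =====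
def Claim_equal_letters_to_numbers : Prop := ∀ (letters_in_alphabet : Int) (first_letter_alphabet : String) (list_not_in_range : Option (List String)), Dom_letters_to_numbers letters_in_alphabet first_letter_alphabet list_not_in_range → Pre_letters_to_numbers letters_in_alphabet first_letter_alphabet list_not_in_range → Spec_letters_to_numbers letters_in_alphabet first_letter_alphabet list_not_in_range (letters_to_numbers letters_in_alphabet first_letter_alphabet list_not_in_range)

-- ===== LEMMAS AND PROOFS =====

theorem pvChr_inj {i j : Int} (hi0 : 0 ≤ i) (hi : i < 55296) (hj0 : 0 ≤ j) (hj : j < 55296)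
    (h : pvChr i = pvChr j) : i = j := by
  have hti : (Char.ofNat i.toNat).toNat = i.toNat := by
    have hv : i.toNat.isValidChar := Or.inl (by omega)
    simp [Char.ofNat, hv, Char.toNat, Char.ofNatAux]
  have htj : (Char.ofNat j.toNat).toNat = j.toNat := by
    have hv : j.toNat.isValidChar := Or.inl (by omega)
    simp [Char.ofNat, hv, Char.toNat, Char.ofNatAux]
  have h2 : Char.ofNat i.toNat = Char.ofNat j.toNat := by
    have := congrArg String.toList h
    simpa [pvChr] using this
  have : i.toNat = j.toNat := by rw [← hti, ← htj, h2]
  omega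

-- the per-key count B uses
def pvCnt (excl : List String) (a i : Int) : Int :=
  (((PySem.List.pyRange a i 1).filter (fun j => decide (pvChr j ∈ excl))).length : Int)

theorem pvCnt_step (excl : List String) {a i : Int} (h : a < i) :
    pvCnt excl a i
      = (if pvChr a ∈ excl then 1 else 0) + pvCnt excl (a + 1) i := by
  unfold pvCnt
  rw [PySem.List.pyRange_one_cons h]
  by_cases hm : pvChr a ∈ excl <;> simp [hm] <;> ring

theorem ltn_loop (excl : List String) :
    ∀ (m : Nat) (a : Int) (d : PySem.Dict String Int) (iaux : Int),
      0 ≤ a → a + (m : Int) ≤ 55296 →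
      (∀ i : Int, a ≤ i → i < a + (m : Int) → d.contains (pvChr i) = false) →
      ((PySem.List.pyRange a (a + (m : Int)) 1).foldl
        (fun (st : PySem.Dict String Int × Int) i =>
          if pvChr i ∉ excl then (st.1.insert (pvChr i) (i - 101 - st.2), st.2)
          else (st.1, st.2 + 1)) (d, iaux)).1.items
      = d.items ++ ((PySem.List.pyRange a (a + (m : Int)) 1).filter
            (fun i => decide (pvChr i ∉ excl))).map
          (fun i => (pvChr i, i - 101 - iaux - pvCnt excl a i)) := by
  intro m
  induction m with
  | zero =>
    intro a d iaux _ _ _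
    rw [PySem.List.pyRange_one_eq_nil (by omega)]
    simp
  | succ m ih =>
    intro a d iaux ha hub hf
    have hlt : a < a + ((m + 1 : Nat) : Int) := by push_cast; omega
    rw [PySem.List.pyRange_one_cons hlt]
    have harg : a + ((m + 1 : Nat) : Int) = (a + 1) + (m : Int) := by push_cast; ring
    by_cases hmem : pvChr a ∈ excl
    · simp only [List.foldl_cons, List.filter_cons]
      rw [if_neg (not_not_intro hmem), if_neg (by simp [hmem])]
      rw [harg]
      rw [ih (a + 1) d (iaux + 1) (by omega) (by omega)
        (fun i h1 h2 => hf i (by omega) (by omega))]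
      congr 1
      apply List.map_congr_left
      intro i hi
      have hmemi : a + 1 ≤ i ∧ i < (a + 1) + (m : Int) := by
        have := List.mem_filter.mp hi |>.1
        exact (PySem.List.mem_pyRange_one).mp this
      have := pvCnt_step excl (show a < i by omega)
      rw [this, if_pos hmem]
      simp; ring
    · simp only [List.foldl_cons, List.filter_cons]
      rw [if_pos hmem, if_pos (by simp [hmem])]
      simp only [List.map_cons]
      rw [harg]
      have hfresh : ∀ i : Int, (a + 1) ≤ i → i < (a + 1) + (m : Int) →
          (d.insert (pvChr a) (a - 101 - iaux)).contains (pvChr i) = false := by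
        intro i h1 h2
        rw [PySem.Dict.contains_insert]
        have hne : (pvChr i == pvChr a) = false := by
          apply beq_false_of_ne
          intro heq
          have := pvChr_inj (by omega) (by omega) ha (by omega) heq
          omega
        rw [hne, hf i (by omega) (by omega)]
        rfl
      rw [ih (a + 1) (d.insert (pvChr a) (a - 101 - iaux)) iaux (by omega) (by omega) hfresh]
      rw [PySem.Dict.items_insert_of_not_contains d _ (hf a (by omega) (by omega))]
      have hcnt0 : pvCnt excl a a = 0 := by
        unfold pvCnt; rw [PySem.List.pyRange_one_eq_nil (by omega)]; simp
      have hcongr2 :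
          ((PySem.List.pyRange (a + 1) ((a + 1) + (m : Int)) 1).filter
              (fun i => decide (pvChr i ∉ excl))).map
            (fun i => (pvChr i, i - 101 - iaux - pvCnt excl (a + 1) i))
          = ((PySem.List.pyRange (a + 1) ((a + 1) + (m : Int)) 1).filter
              (fun i => decide (pvChr i ∉ excl))).map
            (fun i => (pvChr i, i - 101 - iaux - pvCnt excl a i)) := by
        apply List.map_congr_left
        intro i hi
        have hmemi : a + 1 ≤ i ∧ i < (a + 1) + (m : Int) := by
          have := List.mem_filter.mp hi |>.1
          exact (PySem.List.mem_pyRange_one).mp this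
        have := pvCnt_step excl (show a < i by omega)
        rw [this, if_neg hmem]
        simp
      rw [hcongr2, hcnt0]
      simp [List.append_assoc]

theorem dict_empty_contains (k : String) :
    (PySem.Dict.empty : PySem.Dict String Int).contains k = false := by
  simp [PySem.Dict.contains, PySem.Dict.empty]

-- ===== VERDICT (by name: the statement is the Claim_ definition above) =====
theorem letters_to_numbers_spec : Claim_equal_letters_to_numbers := by
  intro n f lnr _ hpre
  obtain ⟨hlen, hub⟩ := hpre
  unfold Spec_letters_to_numbers
  have ha : 0 ≤ pvOrd f := by unfold pvOrd; positivity
  have core : ∀ excl : List String,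
      ((PySem.List.pyRange (pvOrd f) (pvOrd f + n) 1).foldl
        (fun (st : PySem.Dict String Int × Int) i =>
          if pvChr i ∉ excl then (st.1.insert (pvChr i) (i - 101 - st.2), st.2)
          else (st.1, st.2 + 1)) (PySem.Dict.empty, 0)).1.items
      = ((PySem.List.pyRange (pvOrd f) (pvOrd f + n) 1).filter
            (fun i => decide (pvChr i ∉ excl))).map
          (fun i => (pvChr i, i - 101 - pvCnt excl (pvOrd f) i)) := by
    intro excl
    by_cases hn : n ≤ 0
    · rw [PySem.List.pyRange_one_eq_nil (by omega)]
      simp [PySem.Dict.empty]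
    · have hm : pvOrd f + n = pvOrd f + ((n.toNat : Nat) : Int) := by omega
      rw [hm]
      rw [ltn_loop excl n.toNat (pvOrd f) PySem.Dict.empty 0 ha (by omega)
        (fun i _ _ => dict_empty_contains _)]
      simp [PySem.Dict.empty]
  cases lnr with
  | none =>
    simp only [letters_to_numbers, letters_to_numbers_alt, Option.getD]
    exact core _
  | some l =>
    simp only [letters_to_numbers, letters_to_numbers_alt, Option.getD]
    exact core l
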